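-- pv_equiv track=rewrite | github.com/toastwaffle/asciidoc-linter | asciidoc_linter/rules/table_rules.py | extract_table_lines
-- ===== SOURCE A (Python) =====
-- from typing import List, Dict, Any, Union, Optional, Tuple
--
-- def extract_table_lines(content: Union[List[str], List[Tuple[int, str]]]) -> List[List[Tuple[int, str]]]:
--     """Extract tables from document lines.
--     Returns a list of tables, where each table is a list of (line_number, line) tuples.
--     """
--     tables = []
--     current_table = []
--     in_table = False
--
--     # Convert content to list of tuples if it's not already
--     if content and isinstance(content[0], str):
--         content = [(i, line) for i, line in enumerate(content)]
--
--     for line_num, line in content: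
--         if not isinstance(line, str):
--             continue
--
--         stripped = line.strip()
--         if stripped == "|===":
--             if in_table:
--                 current_table.append((line_num, line))
--                 tables.append(current_table)
--                 current_table = []
--                 in_table = False
--             else:
--                 in_table = True
--                 current_table = [(line_num, line)]
--         elif in_table:
--             current_table.append((line_num, line))
--
--     # Handle unclosed table
--     if in_table and current_table:
--         tables.append(current_table)
--
--     return tables
-- ===== SOURCE B (Python) =====
-- def extract_table_lines(content):
--     """Extract tables: collect marker indices once, then pair them up and slice."""
--     if content and isinstance(content[0], str):
--         content = [(i, line) for i, line in enumerate(content)]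
--     entries = [(n, l) for n, l in content if isinstance(l, str)]
--     marks = [i for i, (_, l) in enumerate(entries) if l.strip() == "|==="]
--     tables = []
--     for j in range(0, len(marks) - 1, 2):
--         tables.append(entries[marks[j]:marks[j + 1] + 1])
--     if len(marks) % 2 == 1:
--         tables.append(entries[marks[-1]:])
--     return tables
-- ===== Notes on version B (the rewrite author's own statement) =====
-- stated objective: alternative
-- what changed: Replaces A's stateful scan (in_table flag + growing current_table) by a two-phase decomposition: collect all |=== marker indices in one pass, then pair consecutive markers and emit inclusive slices, with the odd trailing marker yielding the unclosed table as a slice to the end.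
import Mathlib
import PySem

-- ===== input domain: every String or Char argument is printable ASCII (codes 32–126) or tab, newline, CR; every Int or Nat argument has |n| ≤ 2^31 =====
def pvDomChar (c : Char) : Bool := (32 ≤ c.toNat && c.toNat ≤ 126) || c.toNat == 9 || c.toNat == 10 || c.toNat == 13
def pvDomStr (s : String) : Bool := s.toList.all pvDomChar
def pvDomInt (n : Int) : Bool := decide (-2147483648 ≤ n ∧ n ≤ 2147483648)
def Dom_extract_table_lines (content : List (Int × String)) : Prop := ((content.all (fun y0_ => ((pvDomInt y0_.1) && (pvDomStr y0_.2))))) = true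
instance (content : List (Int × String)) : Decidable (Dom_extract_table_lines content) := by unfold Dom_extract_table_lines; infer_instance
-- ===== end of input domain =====

-- B replaces A's stateful in_table/current_table scan by collecting all marker indices once
-- and pairing them consecutively into inclusive slices (objective: alternative decomposition).

-- ===== PORT A =====
-- A's `isinstance(content[0], str)` normalization and the `continue` on non-str lines never
-- fire under the type convention (content : List (Int × String)): they are omitted.
-- The for-loop threads (tables, current_table, in_table) exactly as the Python does.
def extract_table_lines_loop (tables : List (List (Int × String)))
    (current : List (Int × String)) (in_table : Bool) :
    List (Int × String) → List (List (Int × String))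
  | [] =>
      -- Handle unclosed table: `if in_table and current_table`
      if in_table && !current.isEmpty then tables ++ [current] else tables
  | (line_num, line) :: rest =>
      if PySem.Str.strip line = "|===" then
        if in_table then
          extract_table_lines_loop (tables ++ [current ++ [(line_num, line)]]) [] false rest
        else
          extract_table_lines_loop tables [(line_num, line)] true rest
      else if in_table then
        extract_table_lines_loop tables (current ++ [(line_num, line)]) in_table rest
      else
        extract_table_lines_loop tables current in_table rest

def extract_table_lines (content : List (Int × String)) : List (List (Int × String)) :=
  extract_table_lines_loop [] [] false content

-- ===== PORT B =====
-- `[i for i, (_, l) in enumerate(entries) if l.strip() == "|==="]`; indices are list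
-- positions, kept as Nat (zipIdx is enumerate over positions).
def pvMarks (entries : List (Int × String)) (k : Nat) : List Nat :=
  (entries.zipIdx k).filterMap (fun p => if PySem.Str.strip p.1.2 = "|===" then some p.2 else none)

-- the pairing loop `for j in range(0, len(marks)-1, 2)` plus the odd trailing marker;
-- `entries[a:b+1]` = (drop a).take (b+1-a) and `entries[a:]` = drop a, exact for these
-- in-range nonnegative indices.
def pvPairSlices (entries : List (Int × String)) : List Nat → List (List (Int × String))
  | a :: b :: ms => ((entries.drop a).take (b + 1 - a)) :: pvPairSlices entries ms
  | [a] => [entries.drop a]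
  | [] => []

-- B's `entries = [(n, l) for n, l in content if isinstance(l, str)]` keeps everything
-- under the type convention, so entries = content.
def extract_table_lines_alt (content : List (Int × String)) : List (List (Int × String)) :=
  pvPairSlices content (pvMarks content 0)

-- ===== PRECONDITION & SPEC =====
def Spec_extract_table_lines (content : List (Int × String)) (out : List (List (Int × String))) : Prop := out = extract_table_lines_alt content
instance (content : List (Int × String)) (out : List (List (Int × String))) : Decidable (Spec_extract_table_lines content out) := by unfold Spec_extract_table_lines; infer_instance

-- ===== CLAIM (what is proved, stated in full; the proofs are below) =====
def Claim_equal_extract_table_lines : Prop := ∀ (content : List (Int × String)), Dom_extract_table_lines content → Spec_extract_table_lines content (extract_table_lines content)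

-- ===== LEMMAS AND PROOFS =====

-- Reference recursion: the common shape both programs compute.
mutual
def pvOut : List (Int × String) → List (List (Int × String))
  | [] => []
  | (n, l) :: rest =>
      if PySem.Str.strip l = "|===" then pvIn [(n, l)] rest else pvOut rest
def pvIn (acc : List (Int × String)) : List (Int × String) → List (List (Int × String))
  | [] => [acc]
  | (n, l) :: rest =>
      if PySem.Str.strip l = "|===" then (acc ++ [(n, l)]) :: pvOut rest
      else pvIn (acc ++ [(n, l)]) rest
end

theorem pvMarks_cons (n : Int) (l : String) (xs : List (Int × String)) (k : Nat) :
    pvMarks ((n, l) :: xs) k =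
      if PySem.Str.strip l = "|===" then k :: pvMarks xs (k + 1) else pvMarks xs (k + 1) := by
  simp only [pvMarks, List.zipIdx_cons, List.filterMap_cons]
  split <;> simp_all

theorem pvMarks_head_ge (xs : List (Int × String)) (k b : Nat) (ms : List Nat)
    (h : pvMarks xs k = b :: ms) : k ≤ b := by
  induction xs generalizing k with
  | nil => simp [pvMarks] at h
  | cons x xs ih =>
    obtain ⟨n, l⟩ := x
    rw [pvMarks_cons] at h
    split at h
    · obtain ⟨h1, -⟩ := List.cons.inj h
      omega
    · exact Nat.le_of_succ_le (ih (k + 1) h)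

theorem pv_slices_eq (xs : List (Int × String)) :
    (∀ (k : Nat) (c : List (Int × String)), c.drop k = xs →
        pvPairSlices c (pvMarks xs k) = pvOut xs) ∧
    (∀ (k : Nat) (c : List (Int × String)) (acc : List (Int × String)), c.drop k = xs →
        pvIn acc xs =
          match pvMarks xs k with
          | [] => [acc ++ xs]
          | b :: ms' => (acc ++ xs.take (b + 1 - k)) :: pvPairSlices c ms') := by
  induction xs with
  | nil => exact ⟨fun k c _ => by simp [pvMarks, pvPairSlices, pvOut],
      fun k c acc _ => by simp [pvMarks, pvIn]⟩
  | cons x xs ih =>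
    obtain ⟨x1, x2⟩ := x
    have hdrop : ∀ (k : Nat) (c : List (Int × String)),
        c.drop k = (x1, x2) :: xs → c.drop (k + 1) = xs := by
      intro k c h
      rw [← List.drop_drop, h]
      rfl
    constructor
    · intro k c hc
      rw [pvMarks_cons]
      by_cases hm : PySem.Str.strip x2 = "|==="
      · rw [if_pos hm, pvOut, if_pos hm]
        rw [ih.2 (k + 1) c [(x1, x2)] (hdrop k c hc)]
        cases hms : pvMarks xs (k + 1) with
        | nil => simp [pvPairSlices, hc]
        | cons b ms' =>
          have hb : k + 1 ≤ b := pvMarks_head_ge xs (k + 1) b ms' hms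
          simp only [pvPairSlices]
          congr 1
          rw [hc]
          have h1 : b + 1 - k = (b + 1 - (k + 1)) + 1 := by omega
          rw [h1]
          simp
      · rw [if_neg hm, pvOut, if_neg hm]
        exact ih.1 (k + 1) c (hdrop k c hc)
    · intro k c acc hc
      rw [pvMarks_cons, pvIn]
      by_cases hm : PySem.Str.strip x2 = "|==="
      · rw [if_pos hm, if_pos hm]
        show (acc ++ [(x1, x2)]) :: pvOut xs
            = (acc ++ List.take (k + 1 - k) ((x1, x2) :: xs)) :: pvPairSlices c (pvMarks xs (k + 1))
        rw [ih.1 (k + 1) c (hdrop k c hc)]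
        have h1 : k + 1 - k = 1 := by omega
        rw [h1]
        simp
      · rw [if_neg hm, if_neg hm]
        rw [ih.2 (k + 1) c (acc ++ [(x1, x2)]) (hdrop k c hc)]
        cases hms : pvMarks xs (k + 1) with
        | nil => simp
        | cons b ms' =>
          have hb : k + 1 ≤ b := pvMarks_head_ge xs (k + 1) b ms' hms
          dsimp only
          simp only [List.append_assoc]
          congr 3
          have h1 : b + 1 - k = (b + 1 - (k + 1)) + 1 := by omega
          rw [h1]
          simp

theorem pv_loop_eq (xs : List (Int × String)) :
    (∀ (tables : List (List (Int × String))) (current : List (Int × String)),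
        extract_table_lines_loop tables current false xs = tables ++ pvOut xs) ∧
    (∀ (tables : List (List (Int × String))) (current : List (Int × String)),
        current ≠ [] →
        extract_table_lines_loop tables current true xs = tables ++ pvIn current xs) := by
  induction xs with
  | nil =>
    refine ⟨fun tables current => by simp [extract_table_lines_loop, pvOut],
      fun tables current hne => ?_⟩
    simp [extract_table_lines_loop, pvIn, hne]
  | cons x xs ih =>
    obtain ⟨x1, x2⟩ := x
    constructor
    · intro tables current
      rw [extract_table_lines_loop, pvOut]
      by_cases hm : PySem.Str.strip x2 = "|==="
      · rw [if_pos hm, if_pos hm, if_neg (by decide : ¬ (false : Bool) = true)]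
        exact ih.2 tables [(x1, x2)] (by simp)
      · rw [if_neg hm, if_neg hm, if_neg (by decide : ¬ (false : Bool) = true)]
        exact ih.1 tables current
    · intro tables current hne
      rw [extract_table_lines_loop, pvIn]
      by_cases hm : PySem.Str.strip x2 = "|==="
      · rw [if_pos hm, if_pos hm, if_pos rfl, ih.1, List.append_assoc]
        rfl
      · rw [if_neg hm, if_neg hm, if_pos rfl,
          ih.2 tables (current ++ [(x1, x2)]) (by simp)]

-- ===== VERDICT (by name: the statement is the Claim_ definition above) =====
theorem extract_table_lines_spec : Claim_equal_extract_table_lines := by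
  intro content _
  unfold Spec_extract_table_lines extract_table_lines extract_table_lines_alt
  rw [(pv_loop_eq content).1 [] [], (pv_slices_eq content).1 0 content rfl]
  rfl
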